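-- pv_equiv track=rewrite | github.com/1ber/mathematics | 3n.py | countbpot
-- ===== SOURCE A (Python) =====
-- def tob( n ):
--     return ( bin(n)[2:] )
--
-- def count1( n ):
--     return( tob(n).count('1' ) )
--
-- def countbpot( n ):
--     r=[]
--     c=0
--     i=0
--     while( True ):
--         if( count1( i ) == 1 ):
--             r.append([i, c ])
--             c=0
--         else:
--             c=c+1
--         i=i+1
--         if( i == n ):
--             break
--     return( r )
-- ===== SOURCE B (Python) =====
-- def countbpot(n):
--     # Closed form: the powers of two below n, each with its gap count
--     # (number of non-powers since the previous power; 1 before 2**0 because of i=0).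
--     r = []
--     k = 0
--     while (1 << k) < n:
--         r.append([1 << k, 1 if k == 0 else (1 << (k - 1)) - 1])
--         k += 1
--     return r
-- ===== Notes on version B (the rewrite author's own statement) =====
-- stated objective: faster
-- what changed: B iterates only over the O(log n) powers of two below n and computes each gap arithmetically as 2^(k-1)-1, instead of A's scan of every integer 0..n-1 with a per-integer popcount via bin().
import Mathlib
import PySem

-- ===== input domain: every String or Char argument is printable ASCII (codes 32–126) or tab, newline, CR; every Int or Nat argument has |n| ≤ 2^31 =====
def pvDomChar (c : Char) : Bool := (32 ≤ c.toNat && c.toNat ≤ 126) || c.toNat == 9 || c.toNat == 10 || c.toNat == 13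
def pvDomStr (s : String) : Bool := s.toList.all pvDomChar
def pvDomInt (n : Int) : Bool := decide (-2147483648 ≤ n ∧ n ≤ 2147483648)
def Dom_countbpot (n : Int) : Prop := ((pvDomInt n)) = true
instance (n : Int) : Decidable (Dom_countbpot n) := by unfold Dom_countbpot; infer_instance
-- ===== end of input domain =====

-- B lists only the powers of two below n with gaps computed arithmetically (O(log n))
-- instead of A's scan of every integer below n; equivalence proved for n ≥ 1.

-- ===== PORT A =====
-- bin(m)[2:] as a list of chars, for m ≥ 1 (built digit by digit like bin does)
def pyBinDigits : Nat → List Char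
  | 0 => []
  | m + 1 => pyBinDigits ((m + 1) / 2) ++ [if (m + 1) % 2 = 1 then '1' else '0']
decreasing_by exact Nat.div_lt_self (Nat.succ_pos m) one_lt_two

-- tob(n) = bin(n)[2:]; exact for n ≥ 0 (the loop only calls it with 0 ≤ i)
def tob (n : Int) : List Char := if n.toNat = 0 then ['0'] else pyBinDigits n.toNat

def count1 (n : Int) : Int := ((tob n).count '1' : Int)

-- the while-True loop; fuel n.toNat is exactly the number of iterations before `i == n` breaks
def goA : Nat → Int → Int → Int → List (List Int) → List (List Int)
  | 0, _, _, _, r => r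
  | f + 1, n, i, c, r =>
    if count1 i = 1 then
      if i + 1 = n then r ++ [[i, c]] else goA f n (i + 1) 0 (r ++ [[i, c]])
    else
      if i + 1 = n then r else goA f n (i + 1) (c + 1) r

def countbpot (n : Int) : List (List Int) := goA n.toNat n 0 0 []

-- ===== PORT B =====
theorem pvPowLt (k : Nat) : (2:Int)^k < 2^(k+1) := by
  have h : (0:Int) < 2^k := pow_pos (by norm_num) k
  have : (2:Int)^(k+1) = 2 * 2^k := by ring
  omega

def goB (n : Int) (k : Nat) : List (List Int) :=
  if (2:Int)^k < n then
    [(2:Int)^k, if k = 0 then 1 else (2:Int)^(k-1) - 1] :: goB n (k+1)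
  else []
termination_by (n - (2:Int)^k).toNat
decreasing_by
  have h2 := pvPowLt k
  omega

def countbpot_alt (n : Int) : List (List Int) := goB n 0

-- ===== PRECONDITION & SPEC =====
-- Pre_ excludes n ≤ 0, on which A's while-True loop never hits `i == n` and diverges.
def Pre_countbpot (n : Int) : Prop := 1 ≤ n
instance (n : Int) : Decidable (Pre_countbpot n) := by unfold Pre_countbpot; infer_instance
def pvWitness_countbpot : Int := (20)

def Spec_countbpot (n : Int) (out : List (List Int)) : Prop := out = countbpot_alt n
instance (n : Int) (out : List (List Int)) : Decidable (Spec_countbpot n out) := by unfold Spec_countbpot; infer_instance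

-- ===== CLAIM (what is proved, stated in full; the proofs are below) =====
def Claim_equal_countbpot : Prop := ∀ (n : Int), Dom_countbpot n → Pre_countbpot n → Spec_countbpot n (countbpot n)

-- ===== LEMMAS AND PROOFS =====

-- popcount, the value bin(m).count('1') computes
def popcount : Nat → Nat
  | 0 => 0
  | m + 1 => popcount ((m + 1) / 2) + (m + 1) % 2
decreasing_by exact Nat.div_lt_self (Nat.succ_pos m) one_lt_two

theorem popcount_eq (m : Nat) (h : 0 < m) : popcount m = popcount (m / 2) + m % 2 := by
  cases m with
  | zero => omega
  | succ k => rw [popcount]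

theorem pyBin_count (m : Nat) : (pyBinDigits m).count '1' = popcount m := by
  induction m using Nat.strong_induction_on with
  | _ m ih =>
    cases m with
    | zero => simp [pyBinDigits, popcount]
    | succ k =>
      rw [pyBinDigits, popcount, List.count_append,
        ih ((k + 1) / 2) (Nat.div_lt_self (Nat.succ_pos k) one_lt_two)]
      rcases Nat.mod_two_eq_zero_or_one (k + 1) with h | h <;>
        simp [h]

theorem count1_eq (i : Int) : count1 i = (popcount i.toNat : Int) := by
  unfold count1 tob
  by_cases h : i.toNat = 0
  · simp [h, popcount]
  · rw [if_neg h, pyBin_count]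

theorem popcount_pow (k : Nat) : popcount (2^k) = 1 := by
  induction k with
  | zero => simp [popcount_eq 1 one_pos, popcount]
  | succ k ih =>
    rw [popcount_eq _ (Nat.pow_pos (by norm_num))]
    have h1 : 2^(k+1) / 2 = 2^k := by
      rw [pow_succ]; exact Nat.mul_div_cancel _ (by norm_num)
    have h2 : 2^(k+1) % 2 = 0 := by
      rw [pow_succ]; exact Nat.mul_mod_left _ _
    rw [h1, h2, ih]

theorem popcount_between (k : Nat) : ∀ m : Nat, 2^k < m → m < 2^(k+1) → 2 ≤ popcount m := by
  induction k with
  | zero => intro m h1 h2; omega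
  | succ k ih =>
    intro m h1 h2
    have hd1 : 2^k ≤ m / 2 := by
      have : 2^(k+1) = 2 * 2^k := by ring
      omega
    have hd2 : m / 2 < 2^(k+1) := by
      have : 2^(k+2) = 2 * 2^(k+1) := by ring
      omega
    rw [popcount_eq m (by omega)]
    rcases Nat.lt_or_ge (2^k) (m / 2) with hgt | hle
    · have := ih (m / 2) hgt hd2
      omega
    · have heq : m / 2 = 2^k := by omega
      have hodd : m % 2 = 1 := by
        rcases Nat.mod_two_eq_zero_or_one m with h | h
        · exfalso
          have : m = 2 * (m / 2) := by omega
          have h21 : (2:Nat)^(k+1) = 2 * 2^k := by ring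
          omega
        · exact h
      rw [heq, hodd, popcount_pow]

-- count1 on the Int side
theorem pow_toNat (k : Nat) : ((2:Int)^k).toNat = 2^k := by
  have : ((2:Int)^k) = ((2^k : Nat) : Int) := by push_cast; ring
  rw [this, Int.toNat_natCast]

theorem count1_pow (k : Nat) : count1 ((2:Int)^k) = 1 := by
  rw [count1_eq, pow_toNat, popcount_pow]; rfl

theorem count1_between (k : Nat) (m : Int) (h1 : (2:Int)^k < m) (h2 : m < (2:Int)^(k+1)) :
    count1 m ≠ 1 := by
  rw [count1_eq]
  have hk : ((2:Int)^k) = ((2^k : Nat) : Int) := by push_cast; ring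
  have hk1 : ((2:Int)^(k+1)) = ((2^(k+1) : Nat) : Int) := by push_cast; ring
  have hpos : (0:Int) < 2^k := pow_pos (by norm_num) k
  have hn1 : 2^k < m.toNat := by omega
  have hn2 : m.toNat < 2^(k+1) := by omega
  have := popcount_between k m.toNat hn1 hn2
  omega

theorem count1_zero : count1 0 = 0 := by simp [count1, tob]

-- running the loop across j consecutive non-powers adds j to c
theorem goA_stretch (j : Nat) : ∀ (n i c : Int) (r : List (List Int)),
    i + j < n → (∀ t : Nat, t < j → count1 (i + t) ≠ 1) →
    goA ((n - i).toNat) n i c r = goA ((n - (i + j)).toNat) n (i + j) (c + j) r := by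
  induction j with
  | zero => intro n i c r _ _; simp
  | succ j ih =>
    intro n i c r hlt hnp
    have hin : i < n := by omega
    have hf : (n - i).toNat = (n - (i + 1)).toNat + 1 := by omega
    rw [hf, goA]
    have h0 : count1 i ≠ 1 := by
      have := hnp 0 (Nat.succ_pos j); simpa using this
    rw [if_neg h0, if_neg (by omega : ¬ i + 1 = n)]
    rw [ih n (i + 1) (c + 1) r (by push_cast at hlt ⊢; omega)
      (fun t ht => by
        have h := hnp (t + 1) (by omega)
        have e : i + 1 + (t : Int) = i + (((t + 1 : Nat) : Int)) := by push_cast; ring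
        rw [e]; exact h)]
    have e1 : i + 1 + (j : Int) = i + (((j + 1 : Nat) : Int)) := by push_cast; ring
    have e2 : c + 1 + (j : Int) = c + (((j + 1 : Nat) : Int)) := by push_cast; ring
    rw [e1, e2]

-- running to the break through non-powers returns r unchanged
theorem goA_finish (j : Nat) : ∀ (n i c : Int) (r : List (List Int)),
    1 ≤ j → i + j = n → (∀ t : Nat, t < j → count1 (i + t) ≠ 1) →
    goA j n i c r = r := by
  induction j with
  | zero => omega
  | succ j ih =>
    intro n i c r _ heq hnp
    rw [goA]
    have h0 : count1 i ≠ 1 := by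
      have := hnp 0 (Nat.succ_pos j); simpa using this
    rw [if_neg h0]
    by_cases hb : i + 1 = n
    · rw [if_pos hb]
    · rw [if_neg hb]
      have hj : 1 ≤ j := by
        rcases Nat.eq_zero_or_pos j with h | h
        · subst h; push_cast at heq; omega
        · exact h
      exact ih n (i + 1) (c + 1) r hj (by push_cast at heq ⊢; omega)
        (fun t ht => by
          have h := hnp (t + 1) (by omega)
          have e : i + 1 + (t : Int) = i + (((t + 1 : Nat) : Int)) := by push_cast; ring
          rw [e]; exact h)

-- main invariant: from state (i = 2^k, c) the loop produces [2^k, c] and then B's tail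
theorem goA_main (fuel : Nat) : ∀ (k : Nat) (n c : Int) (r : List (List Int)),
    (2:Int)^k < n → fuel = (n - 2^k).toNat →
    goA fuel n ((2:Int)^k) c r = r ++ ([(2:Int)^k, c] :: goB n (k + 1)) := by
  induction fuel using Nat.strong_induction_on with
  | _ fuel ih =>
    intro k n c r hk hf
    have hpos : (0:Int) < 2^k := pow_pos (by norm_num) k
    have hfp : fuel = ((n - 2^k).toNat - 1) + 1 := by omega
    rw [hfp, goA, if_pos (count1_pow k)]
    have hsucc := pvPowLt k
    by_cases hb : (2:Int)^k + 1 = n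
    · rw [if_pos hb]
      have hnot : ¬ (2:Int)^(k+1) < n := by omega
      have hB : goB n (k+1) = [] := by rw [goB, if_neg hnot]
      rw [hB]
    · rw [if_neg hb]
      have hklt : (2:Int)^k + 1 < n := by omega
      by_cases hnext : (2:Int)^(k+1) < n
      · -- reach the next power via 2^k - 1 non-powers, then recurse
        set j : Nat := ((2:Int)^k - 1).toNat with hj
        have hjv : (j : Int) = (2:Int)^k - 1 := by omega
        have hstep : (n - ((2:Int)^k + 1)).toNat = (n - 2^k).toNat - 1 := by omega
        rw [← hstep]
        rw [goA_stretch j n ((2:Int)^k + 1) 0 (r ++ [[(2:Int)^k, c]])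
          (by omega)
          (fun t ht => by
            have h1 : (2:Int)^k < 2^k + 1 + t := by omega
            have h2 : (2:Int)^k + 1 + t < 2^(k+1) := by omega
            exact count1_between k _ h1 h2)]
        have harg : (2:Int)^k + 1 + j = (2:Int)^(k+1) := by
          have : (2:Int)^(k+1) = 2 * 2^k := by ring
          omega
        rw [harg]
        have hfuel' : (n - (2:Int)^(k+1)).toNat < fuel := by omega
        rw [ih _ hfuel' (k+1) n (0 + j) (r ++ [[(2:Int)^k, c]]) hnext rfl]
        have hcv : (0:Int) + (j : Int) = (2:Int)^((k+1)-1) - 1 := by simpa using hjv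
        conv_rhs => rw [goB, if_pos hnext]
        rw [hcv]
        simp
      · -- no further power below n: finish through non-powers to the break
        set j : Nat := (n - ((2:Int)^k + 1)).toNat with hj
        have hj1 : 1 ≤ j := by omega
        have hstep : (n - 2^k).toNat - 1 = j := by omega
        rw [hstep]
        rw [goA_finish j n ((2:Int)^k + 1) 0 (r ++ [[(2:Int)^k, c]]) hj1 (by omega)
          (fun t ht => by
            have h1 : (2:Int)^k < 2^k + 1 + t := by omega
            have h2 : (2:Int)^k + 1 + t < 2^(k+1) := by omega
            exact count1_between k _ h1 h2)]
        have hB : goB n (k+1) = [] := by rw [goB, if_neg hnext]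
        rw [hB]

-- ===== VERDICT (by name: the statement is the Claim_ definition above) =====
theorem countbpot_spec : Claim_equal_countbpot := by
  intro n _ hpre
  unfold Spec_countbpot countbpot countbpot_alt
  have hpre' : (1:Int) ≤ n := hpre
  have hf : n.toNat = (n.toNat - 1) + 1 := by omega
  rw [hf, goA, if_neg (by rw [count1_zero]; norm_num)]
  by_cases h1 : (0:Int) + 1 = n
  · rw [if_pos h1]
    have hB : goB n 0 = [] := by
      have hnot : ¬ (2:Int)^0 < n := by norm_num; omega
      rw [goB, if_neg hnot]
    rw [hB]
  · rw [if_neg h1]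
    have h2 : (2:Int)^0 < n := by norm_num; omega
    have hg : goB n 0 = [1, 1] :: goB n 1 := by
      rw [goB, if_pos h2]
      norm_num
    rw [hg]
    have hm := goA_main ((n - (2:Int)^0).toNat) 0 n (0 + 1) [] h2 rfl
    have hg1 : goB n (0 + 1) = goB n 1 := rfl
    rw [hg1] at hm
    norm_num at hm ⊢
    rw [(by omega : n.toNat - 1 = (n - 1).toNat)]
    convert hm using 2
    norm_num
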